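-- pv_equiv track=rewrite | github.com/gguip1/TIL | archives/BOJ/30090/30090.py | get_vaccine
-- ===== SOURCE A (Python) =====
-- def get_vaccine(string:str, strings:list):
--     if len(strings) == 0:
--         return [string]
--
--     results = []
--     for index, add_string in enumerate(strings):
--         string_copy = strings.copy()
--         string_copy.pop(index)
--
--         k = 0
--         for i in range(min(len(string), len(add_string))):
--             if string[-(i + 1):] == add_string[:(i + 1)]:
--                 k = (i + 1)
--         if k != 0:
--             results.extend(get_vaccine(string + add_string[k:], string_copy))
--         else:
--             continue
--
--     return results
-- ===== SOURCE B (Python) =====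
-- def get_vaccine(string, strings):
--     # Iterative DFS with an explicit stack (children pushed in reverse index
--     # order so leaves come out in A's left-to-right order); the maximal
--     # suffix/prefix overlap is found by a downward scan that stops at the
--     # first (= largest) match instead of scanning every length upward.
--     results = []
--     stack = [(string, strings)]
--     while stack:
--         s, rem = stack.pop()
--         if not rem:
--             results.append(s)
--             continue
--         for idx in reversed(range(len(rem))):
--             t = rem[idx]
--             j = min(len(s), len(t))
--             while j > 0 and s[len(s) - j:] != t[:j]:
--                 j -= 1
--             if j:
--                 stack.append((s + t[j:], rem[:idx] + rem[idx + 1:]))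
--     return results
-- ===== Notes on version B (the rewrite author's own statement) =====
-- stated objective: alternative
-- what changed: A's recursion over the remaining strings is replaced by an iterative DFS with an explicit stack (children pushed in reverse index order so the leaf order is preserved), and A's full upward overlap scan that keeps the last match is replaced by a downward scan that stops at the first (= maximal) match.
import Mathlib
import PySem

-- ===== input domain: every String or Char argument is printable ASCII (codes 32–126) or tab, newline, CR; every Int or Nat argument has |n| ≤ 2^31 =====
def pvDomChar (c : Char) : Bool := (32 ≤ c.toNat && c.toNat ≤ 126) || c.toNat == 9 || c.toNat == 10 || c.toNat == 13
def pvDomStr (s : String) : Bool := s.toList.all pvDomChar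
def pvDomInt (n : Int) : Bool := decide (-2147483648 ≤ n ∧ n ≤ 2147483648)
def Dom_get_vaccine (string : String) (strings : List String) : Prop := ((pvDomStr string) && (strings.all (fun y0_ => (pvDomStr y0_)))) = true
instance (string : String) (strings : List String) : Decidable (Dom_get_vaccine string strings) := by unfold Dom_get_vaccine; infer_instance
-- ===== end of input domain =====

-- B replaces A's recursion by an explicit-stack DFS and A's full upward overlap
-- scan (keeping the last match) by a downward scan stopping at the first match;
-- objective: alternative structure, same results.

-- ===== PORT A =====
-- A's `for index, add_string in enumerate(strings)` loop with
-- `string_copy = strings.copy(); string_copy.pop(index)`: the walk keeps the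
-- already-visited prefix `done`, so string_copy = done ++ rest.
-- Python slices s[-(i+1):] / t[:(i+1)] with 0 < i+1 ≤ min(len s, len t) are
-- exactly drop (len s - (i+1)) / take (i+1) on the character lists.
mutual
def get_vaccine (string : String) (strings : List String) : List String :=
  if strings.length = 0 then [string]
  else pvGoA string [] strings []
termination_by (strings.length, strings.length + 1)

def pvGoA (string : String) (done : List String) (todo : List String) (results : List String) : List String :=
  match todo with
  | [] => results
  | t :: rest =>
    let stringCopy := done ++ rest
    let k := (List.range (min string.toList.length t.toList.length)).foldl
      (fun k i => if string.toList.drop (string.toList.length - (i+1)) = t.toList.take (i+1) then i+1 else k) 0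
    if k ≠ 0 then
      pvGoA string (done ++ [t]) rest
        (results ++ get_vaccine (String.mk (string.toList ++ t.toList.drop k)) stringCopy)
    else
      pvGoA string (done ++ [t]) rest results
termination_by (done.length + todo.length, todo.length)
decreasing_by
  · simp; omega
  · simp; omega
  · simp; omega
end

-- ===== PORT B =====
-- `while j > 0 and s[len(s)-j:] != t[:j]: j -= 1`  (downward scan, first hit = max)
def pvOvGo (s t : List Char) (j : Nat) : Nat :=
  if j = 0 then 0
  else if s.drop (s.length - j) ≠ t.take j then pvOvGo s t (j - 1)
  else j
termination_by j

-- measure used only to justify termination of the stack loop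
def pvMu (stack : List (String × List String)) : Nat :=
  (stack.map (fun p => Nat.factorial (p.2.length + 1))).sum

-- body of B's `for idx in reversed(range(len(rem)))` push loop
def pvPush (s : String) (rem : List String) (st : List (String × List String)) (idx : Nat) : List (String × List String) :=
  if pvOvGo s.toList (rem.getD idx "").toList (min s.toList.length (rem.getD idx "").toList.length) ≠ 0 then
    (String.mk (s.toList ++ (rem.getD idx "").toList.drop
        (pvOvGo s.toList (rem.getD idx "").toList (min s.toList.length (rem.getD idx "").toList.length))),
      rem.take idx ++ rem.drop (idx+1)) :: st
  else st

theorem pvMu_pvPush_le (s : String) (rem : List String) (st : List (String × List String))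
    (idx : Nat) (h : idx < rem.length) :
    pvMu (pvPush s rem st idx) ≤ Nat.factorial rem.length + pvMu st := by
  have hlen : (rem.take idx ++ rem.drop (idx+1)).length + 1 = rem.length := by
    simp; omega
  have h1 : Nat.factorial ((rem.take idx ++ rem.drop (idx+1)).length + 1) = Nat.factorial rem.length := by
    rw [hlen]
  unfold pvPush
  split
  · simp only [pvMu, List.map_cons, List.sum_cons]
    rw [h1]
  · -- nothing pushed
    omega

theorem pvMu_foldl_push_le (s : String) (rem : List String) :
    ∀ (l : List Nat), (∀ i ∈ l, i < rem.length) → ∀ st,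
    pvMu (l.foldl (pvPush s rem) st) ≤ l.length * Nat.factorial rem.length + pvMu st := by
  intro l
  induction l with
  | nil => intro _ st; simp
  | cons a l ih =>
    intro h st
    have ha : a < rem.length := h a (by simp)
    calc pvMu ((a :: l).foldl (pvPush s rem) st)
        = pvMu (l.foldl (pvPush s rem) (pvPush s rem st a)) := by simp
      _ ≤ l.length * Nat.factorial rem.length + pvMu (pvPush s rem st a) :=
          ih (fun i hi => h i (by simp [hi])) _
      _ ≤ l.length * Nat.factorial rem.length + (Nat.factorial rem.length + pvMu st) := by
          have := pvMu_pvPush_le s rem st a ha; omega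
      _ = (a :: l).length * Nat.factorial rem.length + pvMu st := by
          simp [Nat.succ_mul]; ring

-- the stack loop of B (top of the Python stack = head of the list)
def pvBLoop (stack : List (String × List String)) (results : List String) : List String :=
  match stack with
  | [] => results
  | (s, rem) :: rest =>
    if rem.length = 0 then pvBLoop rest (results ++ [s])
    else pvBLoop (((List.range rem.length).reverse).foldl (pvPush s rem) rest) results
termination_by pvMu stack
decreasing_by
  · simp [pvMu]; positivity
  · have hb := pvMu_foldl_push_le s rem ((List.range rem.length).reverse)
      (fun i hi => List.mem_range.mp (List.mem_reverse.mp hi)) rest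
    rw [List.length_reverse, List.length_range] at hb
    have hfac : rem.length * Nat.factorial rem.length < Nat.factorial (rem.length + 1) := by
      rw [Nat.factorial_succ]
      exact (Nat.mul_lt_mul_right (Nat.factorial_pos rem.length)).mpr (by omega)
    have hc : pvMu ((s, rem) :: rest) = Nat.factorial (rem.length + 1) + pvMu rest := by
      simp [pvMu]
    omega

def get_vaccine_alt (string : String) (strings : List String) : List String :=
  pvBLoop [(string, strings)] []

-- ===== PRECONDITION & SPEC =====
def Spec_get_vaccine (string : String) (strings : List String) (out : List String) : Prop := out = get_vaccine_alt string strings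
instance (string : String) (strings : List String) (out : List String) : Decidable (Spec_get_vaccine string strings out) := by unfold Spec_get_vaccine; infer_instance

-- ===== CLAIM (what is proved, stated in full; the proofs are below) =====
def Claim_equal_get_vaccine : Prop := ∀ (string : String) (strings : List String), Dom_get_vaccine string strings → Spec_get_vaccine string strings (get_vaccine string strings)

-- ===== LEMMAS AND PROOFS =====

-- A's ascending last-match scan equals B's descending first-match scan
theorem pvOv_eq (s t : List Char) : ∀ m : Nat,
    (List.range m).foldl
      (fun k i => if s.drop (s.length - (i+1)) = t.take (i+1) then i+1 else k) 0
    = pvOvGo s t m := by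
  intro m
  induction m with
  | zero => simp [pvOvGo]
  | succ m ih =>
    rw [List.range_succ, List.foldl_append, ih]
    have hstep : pvOvGo s t (m+1)
        = if s.drop (s.length - (m+1)) ≠ t.take (m+1) then pvOvGo s t m else (m+1) := by
      rw [pvOvGo]; simp
    rw [hstep]
    by_cases h : s.drop (s.length - (m+1)) = t.take (m+1) <;> simp [h]

-- the per-index child results of node (s, rem)
def pvChild (s : String) (rem : List String) (i : Nat) : List String :=
  if pvOvGo s.toList (rem.getD i "").toList (min s.toList.length (rem.getD i "").toList.length) ≠ 0 then
    get_vaccine (String.mk (s.toList ++ (rem.getD i "").toList.drop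
      (pvOvGo s.toList (rem.getD i "").toList (min s.toList.length (rem.getD i "").toList.length))))
      (rem.take i ++ rem.drop (i+1))
  else []

theorem pvGoA_cons (s t : String) (rest done results : List String) :
    pvGoA s done (t :: rest) results =
      if pvOvGo s.toList t.toList (min s.toList.length t.toList.length) ≠ 0 then
        pvGoA s (done ++ [t]) rest
          (results ++ get_vaccine
            (String.mk (s.toList ++ t.toList.drop
              (pvOvGo s.toList t.toList (min s.toList.length t.toList.length))))
            (done ++ rest))
      else pvGoA s (done ++ [t]) rest results := by
  rw [pvGoA]
  simp only [pvOv_eq]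

theorem pvGoA_eq (s : String) : ∀ (todo done results : List String),
    pvGoA s done todo results
      = results ++ (List.range todo.length).foldr
          (fun i acc =>
            (if pvOvGo s.toList (todo.getD i "").toList
                  (min s.toList.length (todo.getD i "").toList.length) ≠ 0 then
               get_vaccine (String.mk (s.toList ++ (todo.getD i "").toList.drop
                   (pvOvGo s.toList (todo.getD i "").toList
                     (min s.toList.length (todo.getD i "").toList.length))))
                 (done ++ (todo.take i ++ todo.drop (i+1)))
             else []) ++ acc) [] := by
  intro todo
  induction todo with
  | nil => intro done results; simp [pvGoA]
  | cons t rest ih =>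
    intro done results
    rw [pvGoA_cons]
    have hr : List.range (t :: rest).length = 0 :: (List.range rest.length).map Nat.succ := by
      rw [List.length_cons, List.range_succ_eq_map]
    rw [hr, List.foldr_cons, List.foldr_map]
    have hbody : ∀ i ∈ List.range rest.length, ∀ acc : List String,
        ((if pvOvGo s.toList ((t :: rest).getD i.succ "").toList
              (min s.toList.length ((t :: rest).getD i.succ "").toList.length) ≠ 0 then
            get_vaccine (String.mk (s.toList ++ ((t :: rest).getD i.succ "").toList.drop
                (pvOvGo s.toList ((t :: rest).getD i.succ "").toList
                  (min s.toList.length ((t :: rest).getD i.succ "").toList.length))))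
              (done ++ ((t :: rest).take i.succ ++ (t :: rest).drop (i.succ+1)))
          else []) ++ acc)
        = ((if pvOvGo s.toList (rest.getD i "").toList
              (min s.toList.length (rest.getD i "").toList.length) ≠ 0 then
            get_vaccine (String.mk (s.toList ++ (rest.getD i "").toList.drop
                (pvOvGo s.toList (rest.getD i "").toList
                  (min s.toList.length (rest.getD i "").toList.length))))
              ((done ++ [t]) ++ (rest.take i ++ rest.drop (i+1)))
          else []) ++ acc) := by
      intro i _ acc
      simp [List.append_assoc]
    rw [List.foldr_ext _ _ _ hbody]
    simp only [List.getD_cons_zero, List.take_zero, List.drop_succ_cons, List.drop_zero,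
      List.nil_append, Nat.zero_add]
    by_cases h : pvOvGo s.toList t.toList (min s.toList.length t.toList.length) ≠ 0
    · rw [if_pos h, ih, if_pos h, List.append_assoc]
    · rw [if_neg h, ih, if_neg h, List.nil_append]

theorem pv_foldr_init (g : Nat → List String) :
    ∀ (l : List Nat) (init : List String),
    l.foldr (fun i acc => g i ++ acc) init = l.foldr (fun i acc => g i ++ acc) [] ++ init := by
  intro l
  induction l with
  | nil => simp
  | cons a l ih =>
    intro init
    rw [List.foldr_cons, List.foldr_cons, ih init, List.append_assoc]

theorem pv_flatMap_foldr_push (s : String) (rem : List String) :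
    ∀ (l : List Nat) (st : List (String × List String)),
    (l.foldr (fun idx st => pvPush s rem st idx) st).flatMap (fun p => get_vaccine p.1 p.2)
      = l.foldr (fun i acc => pvChild s rem i ++ acc)
          (st.flatMap (fun p => get_vaccine p.1 p.2)) := by
  intro l
  induction l with
  | nil => simp
  | cons a l ih =>
    intro st
    simp only [List.foldr_cons]
    rw [← ih st]
    simp only [pvPush, pvChild]
    by_cases h : pvOvGo s.toList (rem.getD a "").toList
        (min s.toList.length (rem.getD a "").toList.length) ≠ 0
    · rw [if_pos h, if_pos h, List.flatMap_cons]
    · rw [if_neg h, if_neg h, List.nil_append]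

theorem get_vaccine_eq_children (s : String) (rem : List String) (h : ¬ rem.length = 0) :
    get_vaccine s rem = (List.range rem.length).foldr (fun i acc => pvChild s rem i ++ acc) [] := by
  rw [get_vaccine, if_neg h, pvGoA_eq]
  simp [pvChild]

theorem pvBLoop_eq : ∀ (stack : List (String × List String)) (results : List String),
    pvBLoop stack results = results ++ stack.flatMap (fun p => get_vaccine p.1 p.2) := by
  intro stack results
  induction stack, results using pvBLoop.induct with
  | case1 results => simp [pvBLoop]
  | case2 results s rem rest h ih =>
    rw [pvBLoop]
    simp only [h, if_true]
    rw [ih]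
    have hrem : rem = [] := List.length_eq_zero_iff.mp h
    subst hrem
    simp [get_vaccine]
  | case3 results s rem rest h ih =>
    rw [pvBLoop]
    simp only [h, if_false]
    rw [ih, List.foldl_reverse]
    have : (List.range rem.length).foldr (fun x y => pvPush s rem y x) rest
        = (List.range rem.length).foldr (fun idx st => pvPush s rem st idx) rest := rfl
    rw [this, pv_flatMap_foldr_push]
    rw [List.flatMap_cons, get_vaccine_eq_children s rem h]
    rw [pv_foldr_init (pvChild s rem)]

-- ===== VERDICT (by name: the statement is the Claim_ definition above) =====
theorem get_vaccine_spec : Claim_equal_get_vaccine := by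
  intro string strings _
  unfold Spec_get_vaccine get_vaccine_alt
  rw [pvBLoop_eq]
  simp
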